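-- pv_equiv track=rewrite | github.com/scoopeng/competitive-intelligence | competitors/snowflake-cortex/archive/MASTER_TEST_FRAMEWORK.py | identify_missing_capabilities
-- ===== SOURCE A (Python) =====
-- from typing import Dict, List, Tuple, Optional, Any
--
-- def identify_missing_capabilities(query: str, sql: str) -> List[str]:
--     """Identify missing Cortex Analyst capabilities"""
--     missing = []
--     query_lower = query.lower()
--
--     if any(term in query_lower for term in ["month-over-month", "year-over-year", "period"]):
--         missing.append("Window functions (LAG/LEAD)")
--
--     if any(term in query_lower for term in ["why", "investigate", "root cause"]):
--         missing.append("Multi-step reasoning")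
--
--     if "correlation" in query_lower or "regression" in query_lower:
--         missing.append("Statistical functions")
--
--     if "forecast" in query_lower or "predict" in query_lower:
--         missing.append("Predictive analytics")
--
--     return missing
-- ===== SOURCE B (Python) =====
-- TERM_LABEL = [
--     ("month-over-month", "Window functions (LAG/LEAD)"),
--     ("year-over-year", "Window functions (LAG/LEAD)"),
--     ("period", "Window functions (LAG/LEAD)"),
--     ("why", "Multi-step reasoning"),
--     ("investigate", "Multi-step reasoning"),
--     ("root cause", "Multi-step reasoning"),
--     ("correlation", "Statistical functions"),
--     ("regression", "Statistical functions"),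
--     ("forecast", "Predictive analytics"),
--     ("predict", "Predictive analytics"),
-- ]
--
-- LABELS = [
--     "Window functions (LAG/LEAD)",
--     "Multi-step reasoning",
--     "Statistical functions",
--     "Predictive analytics",
-- ]
--
-- def identify_missing_capabilities(query: str, sql: str):
--     # Single left-to-right scan over the lowered query: at each position try
--     # every pattern (naive multi-pattern matching), collecting hit labels in a
--     # set; output labels in canonical order.
--     q = query.lower()
--     found = set()
--     for i in range(len(q) + 1):
--         for term, label in TERM_LABEL:
--             if q.startswith(term, i):
--                 found.add(label)
--     return [label for label in LABELS if label in found]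
-- ===== Notes on version B (the rewrite author's own statement) =====
-- stated objective: alternative
-- what changed: Replaces A's per-keyword substring searches and four if/append branches with a single left-to-right position scan over the lowered query that tries all ten patterns at each position (naive multi-pattern matching), collects hit labels in a set, and emits labels in canonical order.
import Mathlib
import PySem

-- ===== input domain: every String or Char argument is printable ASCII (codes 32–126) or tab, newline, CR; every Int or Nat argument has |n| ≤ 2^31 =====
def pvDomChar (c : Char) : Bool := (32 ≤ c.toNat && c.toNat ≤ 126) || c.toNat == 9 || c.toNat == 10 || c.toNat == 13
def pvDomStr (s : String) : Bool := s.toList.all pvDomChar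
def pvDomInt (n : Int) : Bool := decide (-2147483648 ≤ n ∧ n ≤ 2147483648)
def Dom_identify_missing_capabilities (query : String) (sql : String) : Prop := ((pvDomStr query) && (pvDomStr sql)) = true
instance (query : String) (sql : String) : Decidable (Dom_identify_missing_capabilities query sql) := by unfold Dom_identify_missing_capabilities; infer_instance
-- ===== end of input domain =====

-- B replaces A's per-keyword substring searches by a single position scan over the query
-- (naive multi-pattern matching into a set of labels, emitted in canonical order); objective: alternative.

-- ===== PORT A =====
def identify_missing_capabilities (query : String) (sql : String) : List String :=
  let missing : List String := []
  let query_lower := PySem.Str.lower query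
  let missing :=
    if (["month-over-month", "year-over-year", "period"].any
        (fun term => PySem.Str.isIn term query_lower)) then
      missing ++ ["Window functions (LAG/LEAD)"]
    else missing
  let missing :=
    if (["why", "investigate", "root cause"].any
        (fun term => PySem.Str.isIn term query_lower)) then
      missing ++ ["Multi-step reasoning"]
    else missing
  let missing :=
    if PySem.Str.isIn "correlation" query_lower || PySem.Str.isIn "regression" query_lower then
      missing ++ ["Statistical functions"]
    else missing
  let missing :=
    if PySem.Str.isIn "forecast" query_lower || PySem.Str.isIn "predict" query_lower then
      missing ++ ["Predictive analytics"]
    else missing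
  missing

-- ===== PORT B =====
def TERM_LABEL : List (String × String) :=
  [ ("month-over-month", "Window functions (LAG/LEAD)"),
    ("year-over-year", "Window functions (LAG/LEAD)"),
    ("period", "Window functions (LAG/LEAD)"),
    ("why", "Multi-step reasoning"),
    ("investigate", "Multi-step reasoning"),
    ("root cause", "Multi-step reasoning"),
    ("correlation", "Statistical functions"),
    ("regression", "Statistical functions"),
    ("forecast", "Predictive analytics"),
    ("predict", "Predictive analytics") ]

def LABELS : List String :=
  [ "Window functions (LAG/LEAD)",
    "Multi-step reasoning",
    "Statistical functions",
    "Predictive analytics" ]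

def identify_missing_capabilities_alt (query : String) (sql : String) : List String :=
  let q := PySem.Str.lower query
  let found : PySem.Set String :=
    (PySem.List.pyRange 0 (PySem.Str.len q + 1) 1).foldl
      (fun found i =>
        TERM_LABEL.foldl
          (fun found p =>
            -- q.startswith(term, i): for 0 ≤ i ≤ len(q) this is exactly
            -- "term is a prefix of q's characters from position i on"
            if PySem.Chars.startswith (q.toList.drop i.toNat) p.1.toList then
              PySem.Set.add found p.2
            else found)
          found)
      PySem.Set.empty
  LABELS.filter (fun label => PySem.Set.contains found label)

-- ===== PRECONDITION & SPEC =====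
def Spec_identify_missing_capabilities (query : String) (sql : String) (out : List String) : Prop := out = identify_missing_capabilities_alt query sql
instance (query : String) (sql : String) (out : List String) : Decidable (Spec_identify_missing_capabilities query sql out) := by unfold Spec_identify_missing_capabilities; infer_instance

-- ===== CLAIM (what is proved, stated in full; the proofs are below) =====
def Claim_equal_identify_missing_capabilities : Prop := ∀ (query : String) (sql : String), Dom_identify_missing_capabilities query sql → Spec_identify_missing_capabilities query sql (identify_missing_capabilities query sql)

-- ===== LEMMAS AND PROOFS =====

-- membership after the inner fold over the pattern table
theorem pv_mem_inner (l : List (String × String)) (c : String → Bool)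
    (s : PySem.Set String) (y : String) :
    (y ∈ l.foldl (fun s p => if c p.1 then PySem.Set.add s p.2 else s) s) ↔
      (y ∈ s ∨ ∃ p ∈ l, c p.1 = true ∧ y = p.2) := by
  induction l generalizing s with
  | nil => simp
  | cons p l ih =>
    simp only [List.foldl_cons]
    by_cases h : c p.1 = true
    · rw [if_pos h, ih]
      simp only [PySem.Set.mem_add, List.mem_cons]
      constructor
      · rintro (⟨hy | hy⟩ | ⟨p', hp', hc, hy⟩)
        · exact Or.inl hy
        · exact Or.inr ⟨p, Or.inl rfl, h, hy⟩
        · exact Or.inr ⟨p', Or.inr hp', hc, hy⟩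
      · rintro (hy | ⟨p', (rfl | hp'), hc, hy⟩)
        · exact Or.inl (Or.inl hy)
        · exact Or.inl (Or.inr hy)
        · exact Or.inr ⟨p', hp', hc, hy⟩
    · rw [if_neg h, ih]
      simp only [List.mem_cons]
      constructor
      · rintro (hy | ⟨p', hp', hc, hy⟩)
        · exact Or.inl hy
        · exact Or.inr ⟨p', Or.inr hp', hc, hy⟩
      · rintro (hy | ⟨p', (rfl | hp'), hc, hy⟩)
        · exact Or.inl hy
        · exact absurd hc h
        · exact Or.inr ⟨p', hp', hc, hy⟩

-- membership after the full position scan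
theorem pv_mem_scan (is : List Int) (cs : List Char)
    (s : PySem.Set String) (y : String) :
    (y ∈ is.foldl
        (fun s i => TERM_LABEL.foldl
          (fun s p =>
            if PySem.Chars.startswith (cs.drop i.toNat) p.1.toList then
              PySem.Set.add s p.2
            else s) s) s) ↔
      (y ∈ s ∨ ∃ i ∈ is, ∃ p ∈ TERM_LABEL,
          PySem.Chars.startswith (cs.drop i.toNat) p.1.toList = true ∧ y = p.2) := by
  induction is generalizing s with
  | nil => simp
  | cons i is ih =>
    simp only [List.foldl_cons]
    rw [ih]
    rw [pv_mem_inner TERM_LABEL (fun t => PySem.Chars.startswith (cs.drop i.toNat) t.toList) s y]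
    simp only [List.mem_cons]
    constructor
    · rintro (⟨hy | ⟨p, hp, hc, hy⟩⟩ | ⟨i', hi', p, hp, hc, hy⟩)
      · exact Or.inl hy
      · exact Or.inr ⟨i, Or.inl rfl, p, hp, hc, hy⟩
      · exact Or.inr ⟨i', Or.inr hi', p, hp, hc, hy⟩
    · rintro (hy | ⟨i', (rfl | hi'), p, hp, hc, hy⟩)
      · exact Or.inl (Or.inl hy)
      · exact Or.inl (Or.inr ⟨p, hp, hc, hy⟩)
      · exact Or.inr ⟨i', hi', p, hp, hc, hy⟩

-- a nonempty pattern starts at some scanned position iff it is a substring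
theorem pv_pos_iff_isIn (cs : List Char) (t : List Char) (ht : t ≠ []) :
    (∃ i ∈ PySem.List.pyRange 0 ((cs.length : Int) + 1) 1,
        PySem.Chars.startswith (cs.drop i.toNat) t = true) ↔
      PySem.Chars.isIn t cs = true := by
  rw [← PySem.Chars.exists_prefix_drop_iff_isIn]
  constructor
  · rintro ⟨i, _, hs⟩
    exact ⟨i.toNat, (PySem.Chars.startswith_iff _ _).1 hs⟩
  · rintro ⟨j, hj⟩
    have hjle : j ≤ cs.length := by
      by_contra h
      rw [Nat.not_le] at h
      rw [List.drop_eq_nil_of_le (le_of_lt h)] at hj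
      have := hj.length_le
      simp at this
      exact ht this
    refine ⟨(j : Int), ?_, ?_⟩
    · rw [PySem.List.mem_pyRange_one]
      constructor
      · exact Int.natCast_nonneg j
      · exact_mod_cast Nat.lt_succ_of_le hjle
    · rw [PySem.Chars.startswith_iff]
      simpa using hj

-- ===== VERDICT (by name: the statement is the Claim_ definition above) =====
set_option maxHeartbeats 1000000 in
theorem identify_missing_capabilities_spec : Claim_equal_identify_missing_capabilities := by
  intro query sql _
  unfold Spec_identify_missing_capabilities identify_missing_capabilities identify_missing_capabilities_alt
  dsimp only
  set q := PySem.Str.lower query with hq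
  have hmem : ∀ y : String,
      (y ∈ (PySem.List.pyRange 0 (PySem.Str.len q + 1) 1).foldl
        (fun found i => TERM_LABEL.foldl
          (fun found p =>
            if PySem.Chars.startswith (q.toList.drop i.toNat) p.1.toList then
              PySem.Set.add found p.2
            else found) found) PySem.Set.empty) ↔
      (∃ p ∈ TERM_LABEL, PySem.Chars.isIn p.1.toList q.toList = true ∧ y = p.2) := by
    intro y
    have hlen : PySem.Str.len q = (q.toList.length : Int) := by
      simp [PySem.Str.len]
    rw [hlen, pv_mem_scan]
    simp only [PySem.Set.empty, List.not_mem_nil, false_or]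
    constructor
    · rintro ⟨i, hi, p, hp, hc, hy⟩
      exact ⟨p, hp, (pv_pos_iff_isIn q.toList p.1.toList (by
        fin_cases hp <;> simp)).1 ⟨i, hi, hc⟩, hy⟩
    · rintro ⟨p, hp, hin, hy⟩
      obtain ⟨i, hi, hc⟩ := (pv_pos_iff_isIn q.toList p.1.toList (by
        fin_cases hp <;> simp)).2 hin
      exact ⟨i, hi, p, hp, hc, hy⟩
  set found := (PySem.List.pyRange 0 (PySem.Str.len q + 1) 1).foldl
        (fun found i => TERM_LABEL.foldl
          (fun found p =>
            if PySem.Chars.startswith (q.toList.drop i.toNat) p.1.toList then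
              PySem.Set.add found p.2
            else found) found) PySem.Set.empty with hfound
  have hc : ∀ lbl : String, PySem.Set.contains found lbl = true ↔
      (∃ p ∈ TERM_LABEL, PySem.Chars.isIn p.1.toList q.toList = true ∧ lbl = p.2) := by
    intro lbl
    rw [PySem.Set.contains_iff]
    exact hmem lbl
  clear hmem
  clear_value found
  clear hfound
  have h1 : PySem.Set.contains found "Window functions (LAG/LEAD)" =
      (PySem.Chars.isIn "month-over-month".toList q.toList ||
       PySem.Chars.isIn "year-over-year".toList q.toList ||
       PySem.Chars.isIn "period".toList q.toList) := by
    rw [Bool.eq_iff_iff, hc]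
    simp only [TERM_LABEL, List.mem_cons, List.not_mem_nil, Bool.or_eq_true]
    simp [or_assoc]
  have h2 : PySem.Set.contains found "Multi-step reasoning" =
      (PySem.Chars.isIn "why".toList q.toList ||
       PySem.Chars.isIn "investigate".toList q.toList ||
       PySem.Chars.isIn "root cause".toList q.toList) := by
    rw [Bool.eq_iff_iff, hc]
    simp only [TERM_LABEL, List.mem_cons, List.not_mem_nil, Bool.or_eq_true]
    simp [or_assoc]
  have h3 : PySem.Set.contains found "Statistical functions" =
      (PySem.Chars.isIn "correlation".toList q.toList ||
       PySem.Chars.isIn "regression".toList q.toList) := by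
    rw [Bool.eq_iff_iff, hc]
    simp only [TERM_LABEL, List.mem_cons, List.not_mem_nil, Bool.or_eq_true]
    simp
  have h4 : PySem.Set.contains found "Predictive analytics" =
      (PySem.Chars.isIn "forecast".toList q.toList ||
       PySem.Chars.isIn "predict".toList q.toList) := by
    rw [Bool.eq_iff_iff, hc]
    simp only [TERM_LABEL, List.mem_cons, List.not_mem_nil, Bool.or_eq_true]
    simp
  simp only [LABELS, List.filter_cons, List.filter_nil]
  rw [h1, h2, h3, h4]
  clear hc h1 h2 h3 h4
  simp only [List.any_cons, List.any_nil, Bool.or_false, PySem.Str.isIn_eq]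
  split_ifs <;> simp_all
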